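-- pv_equiv track=rewrite | github.com/GPP-rgb/PrimeVerification | python lucas_lehmer_test.py | modular_reduce
-- ===== SOURCE A (Python) =====
-- def modular_reduce(x, mod):
--     # Reduce polynomial coefficients by modulo
--     while len(x) > 1 and x[-1] == 0:
--         x.pop()
--     for i in range(len(x) - 1, mod, -1):
--         if x[i] != 0:
--             for j in range(mod):
--                 x[i - mod + j] += x[i]
--             x[i] = 0
--     while len(x) > 1 and x[-1] == 0:
--         x.pop()
--     return x
-- ===== SOURCE B (Python) =====
-- def modular_reduce(x, mod):
--     # Descending single pass with a sliding-window running sum instead of the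
--     # inner mod-length addition loop (assumes mod >= 0; see Pre_).
--     n = len(x)
--     while n > 1 and x[n - 1] == 0:
--         n -= 1
--     c = x[:n]
--     s = 0
--     for i in range(n - 2, -1, -1):
--         if i >= mod:
--             s += c[i + 1]
--         if i + mod + 1 <= n - 1:
--             s -= c[i + mod + 1]
--         c[i] += s
--     m = n if mod + 1 > n else mod + 1
--     while m > 1 and c[m - 1] == 0:
--         m -= 1
--     x[:] = c[:m]
--     return x
-- ===== Notes on version B (the rewrite author's own statement) =====
-- stated objective: faster
-- what changed: Replaces A's nested loop (for every nonzero high coefficient, an inner mod-length loop adding it to the mod positions below) by a single descending pass that maintains a sliding-window running sum of the finalized values in the window (i+1..i+mod), plus a prefix-length trim instead of repeated pops.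
-- outside the precondition, e.g. on modular_reduce([1, 2], -1): A returns [0], B returns []; on modular_reduce([1], -5): A raises IndexError, B returns []; on modular_reduce([3, 4, 5], -2): A returns [0], B returns [6, 6]
import Mathlib
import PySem

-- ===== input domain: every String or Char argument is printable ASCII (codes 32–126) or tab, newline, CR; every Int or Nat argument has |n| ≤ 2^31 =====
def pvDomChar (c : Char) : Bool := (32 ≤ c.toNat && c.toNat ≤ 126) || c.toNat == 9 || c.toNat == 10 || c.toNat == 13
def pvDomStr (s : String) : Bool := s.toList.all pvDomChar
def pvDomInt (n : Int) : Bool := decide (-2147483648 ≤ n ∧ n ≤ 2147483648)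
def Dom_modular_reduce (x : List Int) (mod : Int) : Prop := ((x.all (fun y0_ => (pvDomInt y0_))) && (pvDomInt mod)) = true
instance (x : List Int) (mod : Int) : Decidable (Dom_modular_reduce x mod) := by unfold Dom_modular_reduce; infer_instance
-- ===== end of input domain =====

-- B replaces A's inner mod-length addition loop by a single descending pass with a
-- sliding-window running sum (faster, measured asymptotic). A mutates its argument in
-- place; B performs the equivalent in-place replacement (x[:] = ...); the theorems here
-- are about the RETURN value.

-- ===== PORT A =====
-- 'while len(x) > 1 and x[-1] == 0: x.pop()'
def pvTrim (x : List Int) : List Int :=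
  if 1 < x.length ∧ PySem.List.pyGet? x (-1) = some 0 then pvTrim x.dropLast else x
termination_by x.length
decreasing_by simp [List.length_dropLast]; omega

-- inner loop 'for j in range(mod): x[i - mod + j] += x[i]'
-- ('.toNat' is exact here: inside Pre_ (0 ≤ mod) every index Python touches is ≥ 0)
def pvDistribute (acc : List Int) (i mod : Int) : List Int :=
  (PySem.List.pyRange 0 mod 1).foldl
    (fun a j => a.set (i - mod + j).toNat (a.getD (i - mod + j).toNat 0 + a.getD i.toNat 0)) acc

def modular_reduce (x : List Int) (mod : Int) : List Int :=
  let x1 := pvTrim x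
  let x2 := (PySem.List.pyRange ((x1.length : Int) - 1) mod (-1)).foldl
    (fun acc i => if acc.getD i.toNat 0 ≠ 0 then (pvDistribute acc i mod).set i.toNat 0 else acc) x1
  pvTrim x2

-- ===== PORT B =====
-- 'while m > 1 and c[m - 1] == 0: m -= 1'  (trims a prefix LENGTH, reading c)
def pvTrimLen (c : List Int) (m : Nat) : Nat :=
  if 1 < m ∧ c.getD (m - 1) 0 = 0 then pvTrimLen c (m - 1) else m
termination_by m
decreasing_by omega

def modular_reduce_alt (x : List Int) (mod : Int) : List Int :=
  let n := pvTrimLen x x.length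
  let c0 := x.take n
  let res := (PySem.List.pyRange ((n : Int) - 2) (-1) (-1)).foldl
    (fun (cs : List Int × Int) i =>
      let s1 := if mod ≤ i then cs.2 + cs.1.getD (i + 1).toNat 0 else cs.2
      let s2 := if i + mod + 1 ≤ (n : Int) - 1 then s1 - cs.1.getD (i + mod + 1).toNat 0 else s1
      (cs.1.set i.toNat (cs.1.getD i.toNat 0 + s2), s2))
    (c0, 0)
  let mFin : Int := if (n : Int) < mod + 1 then (n : Int) else mod + 1
  let mTrim := pvTrimLen res.1 mFin.toNat
  res.1.take mTrim

-- ===== PRECONDITION & SPEC =====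
-- Pre_ excludes negative mod, on which A either raises IndexError (negative-index
-- wraparound walks off the list) or returns an accidental all-zero remnant produced by
-- the empty inner range and wraparound zeroing; a negative modulus is outside the
-- function's purpose of reducing polynomial coefficients.
def Pre_modular_reduce (_x : List Int) (mod : Int) : Prop := 0 ≤ mod
instance (x : List Int) (mod : Int) : Decidable (Pre_modular_reduce x mod) := by
  unfold Pre_modular_reduce; infer_instance
def pvWitness_modular_reduce : List Int × Int := ([1, 2, 3, 4], 1)

def Spec_modular_reduce (x : List Int) (mod : Int) (out : List Int) : Prop := out = modular_reduce_alt x mod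
instance (x : List Int) (mod : Int) (out : List Int) : Decidable (Spec_modular_reduce x mod out) := by unfold Spec_modular_reduce; infer_instance

-- ===== CLAIM (what is proved, stated in full; the proofs are below) =====
def Claim_equal_modular_reduce : Prop := ∀ (x : List Int) (mod : Int), Dom_modular_reduce x mod → Pre_modular_reduce x mod → Spec_modular_reduce x mod (modular_reduce x mod)

-- ===== LEMMAS AND PROOFS =====

-- pvCv y m n k: the value position k finally carries (for k ≤ mod) resp. carried when
-- A's outer loop processed it (for k > mod), on the trimmed list y of length n.
def pvCv (y : List Int) (m n k : Nat) : Int :=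
  y.getD k 0 + ((List.range m).map (fun j =>
      if _h : m < k + j + 1 ∧ k + j + 1 ≤ n - 1 then pvCv y m n (k + j + 1) else 0)).sum
termination_by n - k
decreasing_by omega

def pvF (y : List Int) (m n t : Nat) : Int :=
  if m < t ∧ t ≤ n - 1 then pvCv y m n t else 0

def pvSB (y : List Int) (m n i0 : Nat) : Int :=
  ((List.range m).map (fun j => pvF y m n (i0 + j + 1))).sum

-- A's list state after the outer loop has processed every index > lo
def pvIA (y : List Int) (m n lo k : Nat) : Int :=
  if lo < k then 0
  else y.getD k 0 + ((List.range m).map (fun j =>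
    if lo < k + j + 1 then pvF y m n (k + j + 1) else 0)).sum

-- B's list state after its loop has processed every index ≥ i0
def pvIB (y : List Int) (m n i0 k : Nat) : Int :=
  if i0 ≤ k then pvCv y m n k else y.getD k 0

theorem pvCv_eq (y : List Int) (m n k : Nat) :
    pvCv y m n k = y.getD k 0 + pvSB y m n k := by
  rw [pvCv, pvSB]
  congr 2


theorem pv_map_range_getD (f : Nat → Int) (n k : Nat) (hk : k < n) :
    ((List.range n).map f).getD k 0 = f k := by
  rw [List.getD_eq_getElem?_getD, List.getElem?_map, List.getElem?_range hk]
  rfl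

theorem pv_map_range_set (f : Nat → Int) (n k : Nat) (v : Int) :
    ((List.range n).map f).set k v
      = (List.range n).map (fun t => if t = k then v else f t) := by
  apply List.ext_getElem
  · simp
  · intro i h1 h2
    simp only [List.getElem_set, List.getElem_map, List.getElem_range]
    simp only [List.length_set, List.length_map, List.length_range] at h1
    by_cases h : i = k
    · subst h; simp
    · rw [if_neg h, if_neg (fun hh : k = i => h hh.symm)]

theorem pv_sum_map_add (l : List Nat) (f g : Nat → Int) :
    (l.map (fun j => f j + g j)).sum = (l.map f).sum + (l.map g).sum := by
  induction l with
  | nil => simp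
  | cons a t ih => simp [ih]; ring

theorem pv_sum_ite_single (m j0 : Nat) (t : Int) :
    ((List.range m).map (fun j => if j = j0 then t else 0)).sum
      = if j0 < m then t else 0 := by
  induction m with
  | zero => simp
  | succ m ih =>
    rw [List.range_succ, List.map_append, List.sum_append, ih]
    by_cases h : j0 < m
    · simp [h, Nat.lt_succ_of_lt h, Nat.ne_of_gt h]
    · by_cases h2 : m = j0
      · subst h2; simp
      · have : ¬ j0 < m + 1 := by omega
        simp [h, h2, this]

-- ===== A side =====

theorem pv_distribute_eq (g : Nat → Int) (m n i : Nat)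
    (hm : m ≤ i) (hi : i < n) :
    pvDistribute ((List.range n).map g) (i : Int) (m : Int)
      = (List.range n).map (fun k => if i - m ≤ k ∧ k < i then g k + g i else g k) := by
  rw [pvDistribute, PySem.List.pyRange_zero_natCast, List.foldl_map]
  have aux : ∀ t, t ≤ m →
      (List.range t).foldl
        (fun a (j : Nat) => a.set ((i : Int) - (m : Int) + (j : Int)).toNat
          (a.getD ((i : Int) - (m : Int) + (j : Int)).toNat 0 + a.getD ((i : Int)).toNat 0))
        ((List.range n).map g)
      = (List.range n).map (fun k => if i - m ≤ k ∧ k < i - m + t then g k + g i else g k) := by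
    intro t
    induction t with
    | zero =>
      intro _
      rw [List.range_zero, List.foldl_nil]
      refine List.map_congr_left ?_
      intro k _
      rw [if_neg (by omega)]
    | succ t ih =>
      intro ht
      rw [List.range_succ, List.foldl_append, ih (by omega), List.foldl_cons, List.foldl_nil]
      have e1 : ((i : Int) - (m : Int) + (t : Int)).toNat = i - m + t := by omega
      have e2 : ((i : Int)).toNat = i := Int.toNat_natCast i
      rw [e1, e2]
      rw [pv_map_range_getD _ n (i - m + t) (by omega),
          pv_map_range_getD _ n i (by omega),
          pv_map_range_set]
      rw [if_neg (by omega), if_neg (by omega)]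
      refine List.map_congr_left ?_
      intro k _
      by_cases hk : k = i - m + t
      · subst hk; rw [if_pos rfl, if_pos (by omega)]
      · rw [if_neg hk]
        by_cases hw : i - m ≤ k ∧ k < i - m + t
        · rw [if_pos hw, if_pos (by omega)]
        · rw [if_neg hw, if_neg (by omega)]
  rw [aux m (le_refl m)]
  refine List.map_congr_left ?_
  intro k _
  by_cases hw : i - m ≤ k ∧ k < i
  · rw [if_pos (by omega), if_pos hw]
  · rw [if_neg (by omega), if_neg hw]

theorem pvIA_pred (y : List Int) (m n lo : Nat) (h1 : m < lo) (h2 : lo ≤ n - 1) (k : Nat) :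
    pvIA y m n (lo - 1) k
      = if k = lo then 0
        else if lo - m ≤ k ∧ k < lo then pvIA y m n lo k + pvCv y m n lo
        else pvIA y m n lo k := by
  by_cases hk1 : lo < k
  · rw [pvIA, if_pos (show lo - 1 < k by omega), if_neg (show ¬ k = lo by omega),
        if_neg (show ¬ (lo - m ≤ k ∧ k < lo) by omega), pvIA, if_pos hk1]
  · by_cases hk2 : k = lo
    · rw [hk2, pvIA, if_pos (show lo - 1 < lo by omega), if_pos rfl]
    · -- k < lo
      have hklo : k < lo := by omega
      rw [pvIA, if_neg (show ¬ lo - 1 < k by omega)]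
      have hsplit : ∀ j ∈ List.range m,
          (if lo - 1 < k + j + 1 then pvF y m n (k + j + 1) else 0)
            = (if lo < k + j + 1 then pvF y m n (k + j + 1) else 0)
              + (if j = lo - k - 1 then pvF y m n lo else 0) := by
        intro j _
        by_cases he : k + j + 1 = lo
        · rw [if_pos (show lo - 1 < k + j + 1 by omega),
              if_neg (show ¬ lo < k + j + 1 by omega),
              if_pos (show j = lo - k - 1 by omega), he]
          ring
        · rw [if_neg (show ¬ j = lo - k - 1 by omega)]
          by_cases hl : lo < k + j + 1
          · rw [if_pos (show lo - 1 < k + j + 1 by omega), if_pos hl]; ring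
          · rw [if_neg (show ¬ lo - 1 < k + j + 1 by omega), if_neg hl]; ring
      rw [List.map_congr_left hsplit, pv_sum_map_add, pv_sum_ite_single]
      have hFlo : pvF y m n lo = pvCv y m n lo := by rw [pvF, if_pos ⟨h1, h2⟩]
      by_cases hw : lo - m ≤ k ∧ k < lo
      · rw [if_neg hk2, if_pos hw, pvIA, if_neg (show ¬ lo < k by omega),
            if_pos (show lo - k - 1 < m by omega), hFlo]
        ring
      · rw [if_neg hk2, if_neg hw, pvIA, if_neg (show ¬ lo < k by omega),
            if_neg (show ¬ lo - k - 1 < m by omega)]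
        ring

theorem pvIA_self (y : List Int) (m n lo : Nat) :
    pvIA y m n lo lo = pvCv y m n lo := by
  rw [pvIA, if_neg (lt_irrefl lo), pvCv_eq, pvSB]
  congr 1
  refine congrArg List.sum (List.map_congr_left ?_)
  intro j _
  rw [if_pos (by omega)]

theorem pv_stepA (y : List Int) (m n lo : Nat) (h1 : m < lo) (h2 : lo + 1 ≤ n) :
    (if ((List.range n).map (pvIA y m n lo)).getD ((lo : Int)).toNat 0 ≠ 0 then
        (pvDistribute ((List.range n).map (pvIA y m n lo)) (lo : Int) (m : Int)).set ((lo : Int)).toNat 0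
      else ((List.range n).map (pvIA y m n lo)))
      = (List.range n).map (pvIA y m n (lo - 1)) := by
  rw [Int.toNat_natCast, pv_map_range_getD _ n lo (by omega)]
  have hself := pvIA_self y m n lo
  by_cases hv : pvIA y m n lo lo = 0
  · rw [if_neg (by simpa using hv)]
    refine List.map_congr_left ?_
    intro k _
    rw [pvIA_pred y m n lo h1 (by omega) k]
    by_cases hk2 : k = lo
    · rw [if_pos hk2, hk2]
      exact hv
    · rw [if_neg hk2]
      by_cases hw : lo - m ≤ k ∧ k < lo
      · rw [if_pos hw, ← hself, hv]; ring
      · rw [if_neg hw]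
  · rw [if_pos (by simpa using hv)]
    rw [pv_distribute_eq (pvIA y m n lo) m n lo (by omega) (by omega), pv_map_range_set]
    refine (List.map_congr_left ?_).symm
    intro k _
    rw [pvIA_pred y m n lo h1 (by omega) k]
    by_cases hk2 : k = lo
    · rw [if_pos hk2, if_pos hk2]
    · rw [if_neg hk2, if_neg hk2]
      by_cases hw : lo - m ≤ k ∧ k < lo
      · rw [if_pos hw, if_pos hw, hself]
      · rw [if_neg hw, if_neg hw]

theorem pv_loopA (y : List Int) (m n d : Nat) (hd : m + d ≤ n - 1) :
    (PySem.List.pyRange ((m + d : Nat) : Int) (m : Int) (-1)).foldl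
      (fun acc i => if acc.getD i.toNat 0 ≠ 0 then (pvDistribute acc i (m : Int)).set i.toNat 0 else acc)
      ((List.range n).map (pvIA y m n (m + d)))
      = (List.range n).map (pvIA y m n m) := by
  induction d with
  | zero =>
    rw [PySem.List.pyRange_neg_one_eq_nil (by simp)]
    rw [List.foldl_nil]
    norm_num
  | succ d ih =>
    have hcast : ((m + (d + 1) : Nat) : Int) = ((m + d + 1 : Nat) : Int) := by push_cast; ring
    rw [hcast, PySem.List.pyRange_neg_one_cons (by push_cast; omega), List.foldl_cons]
    have hstep := pv_stepA y m n (m + d + 1) (by omega) (by omega)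
    have hpred : m + d + 1 - 1 = m + d := by omega
    rw [hpred] at hstep
    have hinit : (List.range n).map (pvIA y m n (m + (d + 1))) = (List.range n).map (pvIA y m n (m + d + 1)) := by
      congr 1
    rw [hinit, hstep, show ((m + d + 1 : Nat) : Int) - 1 = ((m + d : Nat) : Int) by push_cast; ring]
    exact ih (by omega)

theorem pv_afold (y : List Int) (m n : Nat) (hn : n = y.length) (h1 : 1 ≤ n) :
    (PySem.List.pyRange ((n : Int) - 1) (m : Int) (-1)).foldl
      (fun acc i => if acc.getD i.toNat 0 ≠ 0 then (pvDistribute acc i (m : Int)).set i.toNat 0 else acc) y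
      = (List.range n).map (fun k => if m < k then 0 else pvCv y m n k) := by
  by_cases hcase : n - 1 ≤ m
  · rw [PySem.List.pyRange_neg_one_eq_nil (by omega), List.foldl_nil]
    apply List.ext_getElem (by simp [hn])
    intro k h1k h2k
    have hkn : k < n := by simpa using h2k
    rw [List.getElem_map, List.getElem_range]
    rw [if_neg (show ¬ m < k by omega)]
    rw [pvCv_eq, pvSB]
    have hz : ∀ j ∈ List.range m, pvF y m n (k + j + 1) = (0 : Int) := by
      intro j _
      rw [pvF, if_neg (by omega)]
    rw [List.map_congr_left hz]
    rw [List.getD_eq_getElem y 0 (show k < y.length by omega)]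
    simp
  · have hd : (n : Int) - 1 = ((m + (n - 1 - m) : Nat) : Int) := by push_cast; omega
    have hinit : y = (List.range n).map (pvIA y m n (m + (n - 1 - m))) := by
      apply List.ext_getElem (by simp [hn])
      intro k h1k h2k
      have hkn : k < n := by omega
      rw [List.getElem_map, List.getElem_range, pvIA,
        if_neg (show ¬ m + (n - 1 - m) < k by omega)]
      have hz : ∀ j ∈ List.range m,
          (if m + (n - 1 - m) < k + j + 1 then pvF y m n (k + j + 1) else 0) = (0 : Int) := by
        intro j _
        by_cases hc : m + (n - 1 - m) < k + j + 1
        · rw [if_pos hc, pvF, if_neg (by omega)]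
        · rw [if_neg hc]
      rw [List.map_congr_left hz]
      rw [List.getD_eq_getElem y 0 (show k < y.length by omega)]
      simp
    rw [hd]
    conv_lhs => rw [hinit]
    rw [pv_loopA y m n (n - 1 - m) (by omega)]
    refine List.map_congr_left ?_
    intro k _
    rw [pvIA]
    by_cases hk : m < k
    · rw [if_pos hk, if_pos hk]
    · rw [if_neg hk, if_neg hk, pvCv_eq, pvSB]
      congr 1
      refine congrArg List.sum (List.map_congr_left ?_)
      intro j _
      by_cases hc : m < k + j + 1
      · rw [if_pos hc]
      · rw [if_neg hc, pvF, if_neg (by omega)]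

-- ===== B side =====

theorem pv_sB_shift (y : List Int) (m n i : Nat) (hi : i + 2 ≤ n) :
    pvSB y m n i
      = pvSB y m n (i + 1) + (if m ≤ i then pvCv y m n (i + 1) else 0)
          - (if i + m + 1 ≤ n - 1 then pvCv y m n (i + m + 1) else 0) := by
  have hpeel : ((List.range (m + 1)).map (fun j => pvF y m n (i + j + 1))).sum
      = pvSB y m n i + pvF y m n (i + m + 1) := by
    rw [List.range_succ, List.map_append, List.sum_append, pvSB]
    simp
  have hpeel2 : ((List.range (m + 1)).map (fun j => pvF y m n (i + j + 1))).sum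
      = pvF y m n (i + 1) + pvSB y m n (i + 1) := by
    rw [List.range_succ_eq_map, List.map_cons, List.map_map, List.sum_cons, pvSB]
    congr 2
    refine List.map_congr_left ?_
    intro j _
    simp only [Function.comp_apply]
    congr 1
    omega
  have hF1 : pvF y m n (i + 1) = (if m ≤ i then pvCv y m n (i + 1) else 0) := by
    by_cases hc : m ≤ i
    · rw [pvF, if_pos ⟨by omega, by omega⟩, if_pos hc]
    · rw [pvF, if_neg (by omega), if_neg hc]
  have hF2 : pvF y m n (i + m + 1) = (if i + m + 1 ≤ n - 1 then pvCv y m n (i + m + 1) else 0) := by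
    by_cases hc : i + m + 1 ≤ n - 1
    · rw [pvF, if_pos ⟨by omega, hc⟩, if_pos hc]
    · rw [pvF, if_neg (by omega), if_neg hc]
  rw [← hF1, ← hF2]
  omega

theorem pv_stepB (y : List Int) (m n i : Nat) (hi : i + 2 ≤ n) :
    (let cs : List Int × Int := ((List.range n).map (pvIB y m n (i + 1)), pvSB y m n (i + 1))
     let s1 := if (m : Int) ≤ ((i : Nat) : Int) then cs.2 + cs.1.getD (((i : Nat) : Int) + 1).toNat 0 else cs.2
     let s2 := if ((i : Nat) : Int) + (m : Int) + 1 ≤ (n : Int) - 1 then s1 - cs.1.getD (((i : Nat) : Int) + (m : Int) + 1).toNat 0 else s1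
     (cs.1.set ((i : Nat) : Int).toNat (cs.1.getD ((i : Nat) : Int).toNat 0 + s2), s2))
      = ((List.range n).map (pvIB y m n i), pvSB y m n i) := by
  have e0 : ((i : Int)).toNat = i := Int.toNat_natCast i
  have e1 : ((i : Int) + 1).toNat = i + 1 := by omega
  have e2 : ((i : Int) + (m : Int) + 1).toNat = i + m + 1 := by omega
  have hg1 : ((List.range n).map (pvIB y m n (i + 1))).getD (i + 1) 0 = pvCv y m n (i + 1) := by
    rw [pv_map_range_getD _ n (i + 1) (by omega), pvIB, if_pos (by omega)]
  have hgi : ((List.range n).map (pvIB y m n (i + 1))).getD i 0 = y.getD i 0 := by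
    rw [pv_map_range_getD _ n i (by omega), pvIB, if_neg (by omega)]
  have hs2 : (if (i : Int) + (m : Int) + 1 ≤ (n : Int) - 1 then
        (if (m : Int) ≤ (i : Int) then pvSB y m n (i + 1) + ((List.range n).map (pvIB y m n (i + 1))).getD ((i : Int) + 1).toNat 0 else pvSB y m n (i + 1))
          - ((List.range n).map (pvIB y m n (i + 1))).getD ((i : Int) + (m : Int) + 1).toNat 0
      else (if (m : Int) ≤ (i : Int) then pvSB y m n (i + 1) + ((List.range n).map (pvIB y m n (i + 1))).getD ((i : Int) + 1).toNat 0 else pvSB y m n (i + 1)))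
      = pvSB y m n i := by
    rw [e1, e2, hg1, pv_sB_shift y m n i hi]
    by_cases hc2 : i + m + 1 ≤ n - 1
    · rw [if_pos (show (i : Int) + (m : Int) + 1 ≤ (n : Int) - 1 by omega), if_pos hc2,
        pv_map_range_getD _ n (i + m + 1) (show i + m + 1 < n by omega), pvIB,
        if_pos (show i + 1 ≤ i + m + 1 by omega)]
      by_cases hc1 : m ≤ i
      · rw [if_pos (show (m : Int) ≤ (i : Int) by omega), if_pos hc1]
      · rw [if_neg (show ¬ (m : Int) ≤ (i : Int) by omega), if_neg hc1]
        ring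
    · rw [if_neg (show ¬ ((i : Int) + (m : Int) + 1 ≤ (n : Int) - 1) by omega), if_neg hc2]
      by_cases hc1 : m ≤ i
      · rw [if_pos (show (m : Int) ≤ (i : Int) by omega), if_pos hc1]
        ring
      · rw [if_neg (show ¬ (m : Int) ≤ (i : Int) by omega), if_neg hc1]
        ring
  show (_, _) = (_, _)
  rw [Prod.mk.injEq]
  constructor
  · rw [hs2, e0, hgi, pv_map_range_set]
    refine List.map_congr_left ?_
    intro k _
    by_cases hk : k = i
    · rw [if_pos hk, hk, pvIB, if_pos (le_refl i), pvCv_eq]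
    · rw [if_neg hk, pvIB, pvIB]
      by_cases hik : i ≤ k
      · rw [if_pos (show i + 1 ≤ k by omega), if_pos hik]
      · rw [if_neg (show ¬ i + 1 ≤ k by omega), if_neg hik]
  · exact hs2

theorem pv_loopB (y : List Int) (m n i : Nat) (hi : i + 2 ≤ n) :
    (PySem.List.pyRange (i : Int) (-1) (-1)).foldl
      (fun (cs : List Int × Int) (j : Int) =>
        let s1 := if (m : Int) ≤ j then cs.2 + cs.1.getD (j + 1).toNat 0 else cs.2
        let s2 := if j + (m : Int) + 1 ≤ (n : Int) - 1 then s1 - cs.1.getD (j + (m : Int) + 1).toNat 0 else s1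
        (cs.1.set j.toNat (cs.1.getD j.toNat 0 + s2), s2))
      ((List.range n).map (pvIB y m n (i + 1)), pvSB y m n (i + 1))
      = ((List.range n).map (pvIB y m n 0), pvSB y m n 0) := by
  induction i with
  | zero =>
    rw [PySem.List.pyRange_neg_one_cons (show (-1 : Int) < ((0 : Nat) : Int) by norm_num),
      show ((0 : Nat) : Int) - 1 = -1 by norm_num,
      PySem.List.pyRange_neg_one_eq_nil (le_refl (-1 : Int)), List.foldl_cons, List.foldl_nil]
    exact pv_stepB y m n 0 hi
  | succ i ih =>
    rw [PySem.List.pyRange_neg_one_cons (show (-1 : Int) < ((i + 1 : Nat) : Int) by push_cast; omega),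
      List.foldl_cons]
    have hstep := pv_stepB y m n (i + 1) (by omega)
    rw [show ((i + 1 : Nat) : Int) - 1 = ((i : Nat) : Int) by push_cast; ring]
    refine Eq.trans (congrArg (fun st => List.foldl _ st (PySem.List.pyRange ((i : Nat) : Int) (-1) (-1))) hstep) ?_
    exact ih (by omega)

theorem pv_bfold (y : List Int) (m n : Nat) (hn : n = y.length) (h1 : 1 ≤ n) :
    ((PySem.List.pyRange ((n : Int) - 2) (-1) (-1)).foldl
      (fun (cs : List Int × Int) (j : Int) =>
        let s1 := if (m : Int) ≤ j then cs.2 + cs.1.getD (j + 1).toNat 0 else cs.2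
        let s2 := if j + (m : Int) + 1 ≤ (n : Int) - 1 then s1 - cs.1.getD (j + (m : Int) + 1).toNat 0 else s1
        (cs.1.set j.toNat (cs.1.getD j.toNat 0 + s2), s2))
      (y, 0)).1
      = (List.range n).map (pvCv y m n) := by
  have hIB0 : (List.range n).map (pvIB y m n 0) = (List.range n).map (pvCv y m n) := by
    refine List.map_congr_left ?_
    intro k _
    rw [pvIB, if_pos (Nat.zero_le k)]
  have hinit : y = (List.range n).map (pvIB y m n (n - 1)) := by
    apply List.ext_getElem (by simp [hn])
    intro k h1k h2k
    have hkn : k < n := by omega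
    rw [List.getElem_map, List.getElem_range, pvIB]
    by_cases hc : n - 1 ≤ k
    · have hk : k = n - 1 := by omega
      rw [if_pos hc, pvCv_eq, pvSB]
      have hz : ∀ j ∈ List.range m, pvF y m n (k + j + 1) = (0 : Int) := by
        intro j _
        rw [pvF, if_neg (by omega)]
      rw [List.map_congr_left hz]
      rw [List.getD_eq_getElem y 0 (show k < y.length by omega)]
      simp
    · rw [if_neg hc, List.getD_eq_getElem y 0 (show k < y.length by omega)]
  by_cases hn1 : n = 1
  · subst hn1
    rw [show ((1 : Nat) : Int) - 2 = -1 by norm_num,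
      PySem.List.pyRange_neg_one_eq_nil (by norm_num), List.foldl_nil]
    apply List.ext_getElem (by simp [hn])
    intro k h1k h2k
    rw [List.getElem_map, List.getElem_range, pvCv_eq, pvSB]
    have hz : ∀ j ∈ List.range m, pvF y m 1 (k + j + 1) = (0 : Int) := by
      intro j _
      rw [pvF, if_neg (by omega)]
    rw [List.map_congr_left hz, List.getD_eq_getElem y 0 (show k < y.length by omega)]
    simp
  · have hn2 : 2 ≤ n := by omega
    have hsB : (0 : Int) = pvSB y m n (n - 1) := by
      rw [pvSB]
      have hz : ∀ j ∈ List.range m, pvF y m n (n - 1 + j + 1) = (0 : Int) := by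
        intro j _
        rw [pvF, if_neg (by omega)]
      rw [List.map_congr_left hz]
      simp
    have he : (n : Int) - 2 = ((n - 2 : Nat) : Int) := by omega
    have he2 : n - 2 + 1 = n - 1 := by omega
    have hpair : ((y : List Int), (0 : Int))
        = ((List.range n).map (pvIB y m n (n - 2 + 1)), pvSB y m n (n - 2 + 1)) := by
      rw [he2, ← hsB, ← hinit]
    conv_lhs => rw [he, hpair]
    rw [pv_loopB y m n (n - 2) (by omega)]
    exact hIB0

-- ===== trims =====

theorem pvTrimLen_le (c : List Int) (t : Nat) : pvTrimLen c t ≤ t := by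
  induction t using Nat.strong_induction_on with
  | _ t ih =>
    rw [pvTrimLen]
    split_ifs with h
    · exact le_trans (ih (t - 1) (by omega)) (by omega)
    · exact le_refl t

theorem pvTrimLen_congr (c c' : List Int) (t : Nat)
    (h : ∀ k, k < t → c.getD k 0 = c'.getD k 0) : pvTrimLen c t = pvTrimLen c' t := by
  induction t using Nat.strong_induction_on with
  | _ t ih =>
    conv_lhs => rw [pvTrimLen]
    conv_rhs => rw [pvTrimLen]
    by_cases h1 : 1 < t
    · rw [h (t - 1) (by omega)]
      split_ifs with h2
      · exact ih (t - 1) (by omega) (fun k hk => h k (by omega))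
      · rfl
    · simp [h1]

theorem pvTrimLen_zeros (c : List Int) (a b : Nat) (ha : 1 ≤ a) (hab : a ≤ b)
    (h : ∀ k, a ≤ k → k < b → c.getD k 0 = 0) : pvTrimLen c b = pvTrimLen c a := by
  induction b using Nat.strong_induction_on with
  | _ b ih =>
    by_cases hab2 : a = b
    · rw [hab2]
    · have hb : 1 < b := by omega
      rw [pvTrimLen, if_pos ⟨hb, h (b - 1) (by omega) (by omega)⟩]
      exact ih (b - 1) (by omega) (by omega) (fun k hk1 hk2 => h k hk1 (by omega))

theorem pv_pyGet_neg_one (x : List Int) (h : x ≠ []) :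
    PySem.List.pyGet? x (-1) = some (x.getD (x.length - 1) 0) := by
  have hl : 1 ≤ x.length := List.length_pos_of_ne_nil h
  simp only [PySem.List.pyGet?, PySem.List.pyIdx?]
  rw [if_neg (by omega), if_pos (by omega : -(x.length : Int) ≤ -1)]
  rw [show ((some (x.length - (- -1 : Int).toNat)).bind fun k => x[k]?) = x[x.length - (- -1 : Int).toNat]? from rfl]
  rw [List.getD_eq_getElem x 0 (by omega), List.getElem?_eq_getElem (by omega : x.length - (-(-1 : Int)).toNat < x.length)]
  simp

theorem pvTrim_eq (x : List Int) : pvTrim x = x.take (pvTrimLen x x.length) := by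
  induction x using pvTrim.induct with
  | case1 x h ih =>
      have hl : 1 < x.length := h.1
      have hlast : x.getD (x.length - 1) 0 = 0 := by
        have := h.2
        rw [pv_pyGet_neg_one x (by intro hx; subst hx; simp at hl)] at this
        exact Option.some_injective _ this
      rw [pvTrim, if_pos h, ih]
      have hdl : x.dropLast.length = x.length - 1 := List.length_dropLast (xs := x)
      have hcongr : pvTrimLen x.dropLast (x.length - 1) = pvTrimLen x (x.length - 1) := by
        apply pvTrimLen_congr
        intro k hk
        rw [List.getD_eq_getElem x.dropLast 0 (by omega), List.getD_eq_getElem x 0 (by omega),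
          List.getElem_dropLast]
      have hstep : pvTrimLen x x.length = pvTrimLen x (x.length - 1) := by
        conv_lhs => rw [pvTrimLen]
        rw [if_pos ⟨hl, hlast⟩]
      rw [hdl, hcongr, ← hstep, List.dropLast_eq_take, List.take_take]
      congr 1
      have := pvTrimLen_le x x.length
      have h2 := hstep
      have := pvTrimLen_le x (x.length - 1)
      omega
  | case2 x h =>
      rw [pvTrim, if_neg h]
      by_cases h1 : 1 < x.length
      · have hlast : ¬ x.getD (x.length - 1) 0 = 0 := by
          intro hz
          exact h ⟨h1, by rw [pv_pyGet_neg_one x (by intro hx; subst hx; simp at h1), hz]⟩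
        rw [pvTrimLen, if_neg (by intro hh; exact hlast hh.2), List.take_length]
      · rw [pvTrimLen, if_neg (by intro hh; exact h1 hh.1), List.take_length]

theorem pv_take_congr (a b : List Int) (t : Nat) (hta : t ≤ a.length) (htb : t ≤ b.length)
    (h : ∀ k, k < t → a.getD k 0 = b.getD k 0) : a.take t = b.take t := by
  apply List.ext_getElem
  · simp; omega
  · intro i h1 h2
    simp only [List.getElem_take]
    simp only [List.length_take] at h1
    have hi : i < t := by omega
    have := h i hi
    rwa [List.getD_eq_getElem a 0 (by omega), List.getD_eq_getElem b 0 (by omega)] at this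

-- ===== VERDICT (by name: the statement is the Claim_ definition above) =====
theorem modular_reduce_spec : Claim_equal_modular_reduce := by
  intro x mod hdom hpre
  obtain ⟨m, rfl⟩ : ∃ m : Nat, mod = (m : Int) := ⟨mod.toNat, by
    have : (0 : Int) ≤ mod := hpre
    omega⟩
  unfold Spec_modular_reduce
  simp only [modular_reduce, modular_reduce_alt]
  rw [← pvTrim_eq x]
  have hyl : (pvTrim x).length = pvTrimLen x x.length := by
    rw [pvTrim_eq x, List.length_take]
    have := pvTrimLen_le x x.length
    omega
  rw [← hyl]
  set y := pvTrim x with hy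
  set n := y.length with hn
  by_cases hn0 : n = 0
  · have hynil : y = [] := List.eq_nil_of_length_eq_zero hn0
    rw [hynil, hn0]
    rw [PySem.List.pyRange_neg_one_eq_nil (show ((0 : Nat) : Int) - 1 ≤ (m : Int) by omega),
      PySem.List.pyRange_neg_one_eq_nil (show ((0 : Nat) : Int) - 2 ≤ (-1 : Int) by omega),
      List.foldl_nil, List.foldl_nil]
    rw [pvTrim, if_neg (by simp)]
    rw [if_pos (show ((0 : Nat) : Int) < (m : Int) + 1 by omega)]
    rw [show (((0 : Nat) : Int)).toNat = 0 by omega]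
    rw [pvTrimLen, if_neg (by simp)]
    simp
  · have h1 : 1 ≤ n := by omega
    rw [pv_afold y m n hn h1, pv_bfold y m n hn h1]
    have hLAlen : ((List.range n).map (fun k => if m < k then 0 else pvCv y m n k)).length = n := by
      simp
    rw [pvTrim_eq ((List.range n).map (fun k => if m < k then 0 else pvCv y m n k)), hLAlen]
    have hmfin : (if (n : Int) < (m : Int) + 1 then (n : Int) else (m : Int) + 1).toNat
        = min n (m + 1) := by
      split_ifs <;> omega
    rw [hmfin]
    have hza : pvTrimLen ((List.range n).map (fun k => if m < k then 0 else pvCv y m n k)) n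
        = pvTrimLen ((List.range n).map (fun k => if m < k then 0 else pvCv y m n k)) (min n (m + 1)) := by
      apply pvTrimLen_zeros _ _ _ (by omega) (by omega)
      intro k hk1 hk2
      rw [pv_map_range_getD _ n k (by omega), if_pos (show m < k by omega)]
    have hcg : pvTrimLen ((List.range n).map (fun k => if m < k then 0 else pvCv y m n k)) (min n (m + 1))
        = pvTrimLen ((List.range n).map (pvCv y m n)) (min n (m + 1)) := by
      apply pvTrimLen_congr
      intro k hk
      rw [pv_map_range_getD _ n k (by omega), pv_map_range_getD _ n k (by omega),
        if_neg (show ¬ m < k by omega)]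
    rw [hza, hcg]
    apply pv_take_congr
    · have := pvTrimLen_le ((List.range n).map (pvCv y m n)) (min n (m + 1))
      simp
      omega
    · have := pvTrimLen_le ((List.range n).map (pvCv y m n)) (min n (m + 1))
      simp
      omega
    · intro k hk
      have hkb := pvTrimLen_le ((List.range n).map (pvCv y m n)) (min n (m + 1))
      rw [pv_map_range_getD _ n k (by omega), pv_map_range_getD _ n k (by omega),
        if_neg (show ¬ m < k by omega)]
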